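-- pv_equiv track=rewrite | github.com/nels2248/congress | cluster_topics.py | party_breakdown
-- ===== SOURCE A (Python) =====
-- from collections import defaultdict
--
-- def party_breakdown(bills, labels):
--     breakdown = defaultdict(lambda: defaultdict(int))
--     for bill, label in zip(bills, labels):
--         if label == -1:
--             continue
--         party = bill.get("sponsor_party") or "Unknown"
--         breakdown[int(label)][party] += 1
--     return {k: dict(v) for k, v in breakdown.items()}
-- ===== SOURCE B (Python) =====
-- def party_breakdown(bills, labels):
--     # Two-pass alternative: materialise (label, party) pairs once, then build the
--     # result per distinct label by scanning and counting, instead of A's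
--     # incrementally updated nested defaultdicts.
--     pairs = [(int(l), bill.get("sponsor_party") or "Unknown")
--              for bill, l in zip(bills, labels) if l != -1]
--     out = {}
--     for lab in dict.fromkeys(l for l, _ in pairs):
--         group = [p for l, p in pairs if l == lab]
--         out[lab] = {p: group.count(p) for p in dict.fromkeys(group)}
--     return out
-- ===== Notes on version B (the rewrite author's own statement) =====
-- stated objective: alternative
-- what changed: Replaces A's single-pass nested defaultdict accumulation with a two-phase plan: build the (label, party) pair list once, then for each first-occurrence-distinct label scan the pairs and count each distinct party with list.count.
import Mathlib
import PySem

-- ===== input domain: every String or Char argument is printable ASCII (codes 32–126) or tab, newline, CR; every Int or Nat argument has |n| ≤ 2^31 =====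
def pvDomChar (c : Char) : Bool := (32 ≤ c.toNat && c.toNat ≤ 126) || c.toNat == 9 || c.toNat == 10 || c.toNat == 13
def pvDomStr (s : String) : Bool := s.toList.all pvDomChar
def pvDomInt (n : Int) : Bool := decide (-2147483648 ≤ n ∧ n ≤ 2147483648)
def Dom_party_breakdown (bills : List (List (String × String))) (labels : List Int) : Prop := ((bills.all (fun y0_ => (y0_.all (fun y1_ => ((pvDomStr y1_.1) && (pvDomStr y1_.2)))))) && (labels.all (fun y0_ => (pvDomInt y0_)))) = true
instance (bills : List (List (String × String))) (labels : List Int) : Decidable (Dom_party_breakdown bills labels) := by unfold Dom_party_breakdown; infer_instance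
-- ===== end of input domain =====

-- B replaces A's single-pass nested-defaultdict accumulation by a two-phase plan
-- (collect (label, party) pairs, then per distinct label scan and count); same
-- result, different algorithm (objective: alternative).

-- ===== PORT A =====
-- party = bill.get("sponsor_party") or "Unknown"  (None and "" are falsy)
def pbParty (bill : List (String × String)) : String :=
  match (PySem.Dict.ofList bill).get? "sponsor_party" with
  | none => "Unknown"
  | some s => if s == "" then "Unknown" else s

def party_breakdown (bills : List (List (String × String))) (labels : List Int) : List (Int × List (String × Int)) :=
  ((List.zip bills labels).foldl
      (fun d bl =>
        if bl.2 == -1 then d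
        else d.insert bl.2 ((d.getD bl.2 PySem.Dict.empty).modify (pbParty bl.1) 0 (· + 1)))
      (PySem.Dict.empty : PySem.Dict Int (PySem.Dict String Int))).items.map
    (fun kv => (kv.1, kv.2.items))

-- ===== PORT B =====
def pbPairs (bills : List (List (String × String))) (labels : List Int) : List (Int × String) :=
  (List.zip bills labels).filterMap
    (fun bl => if bl.2 ≠ -1 then some (bl.2, pbParty bl.1) else none)

-- group = [p for l, p in pairs if l == lab]
def pbGroup (pairs : List (Int × String)) (lab : Int) : List String :=
  (pairs.filter (fun q => q.1 == lab)).map (·.2)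

def party_breakdown_alt (bills : List (List (String × String))) (labels : List Int) : List (Int × List (String × Int)) :=
  (PySem.Set.ofList ((pbPairs bills labels).map (·.1))).map
    (fun lab =>
      (lab, (PySem.Set.ofList (pbGroup (pbPairs bills labels) lab)).map
              (fun p => (p, ((pbGroup (pbPairs bills labels) lab).count p : Int)))))

-- ===== PRECONDITION & SPEC =====
def Spec_party_breakdown (bills : List (List (String × String))) (labels : List Int) (out : List (Int × List (String × Int))) : Prop := out = party_breakdown_alt bills labels
instance (bills : List (List (String × String))) (labels : List Int) (out : List (Int × List (String × Int))) : Decidable (Spec_party_breakdown bills labels out) := by unfold Spec_party_breakdown; infer_instance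

-- ===== CLAIM (what is proved, stated in full; the proofs are below) =====
def Claim_equal_party_breakdown : Prop := ∀ (bills : List (List (String × String))) (labels : List Int), Dom_party_breakdown bills labels → Spec_party_breakdown bills labels (party_breakdown bills labels)

-- ===== LEMMAS AND PROOFS =====

-- A's loop, skipping label == -1, is the plain counting fold over the filtered pairs.
lemma pb_fold_skip (l : List (List (String × String) × Int))
    (d : PySem.Dict Int (PySem.Dict String Int)) :
    l.foldl
      (fun d bl =>
        if bl.2 == -1 then d
        else d.insert bl.2 ((d.getD bl.2 PySem.Dict.empty).modify (pbParty bl.1) 0 (· + 1))) d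
    = (l.filterMap (fun bl => if bl.2 ≠ -1 then some (bl.2, pbParty bl.1) else none)).foldl
        (fun d p => d.insert p.1 ((d.getD p.1 PySem.Dict.empty).modify p.2 0 (· + 1))) d := by
  induction l generalizing d with
  | nil => rfl
  | cons x xs ih =>
    by_cases h : x.2 = -1
    · simpa [h] using ih d
    · simpa [h] using ih (d.insert x.2 ((d.getD x.2 PySem.Dict.empty).modify (pbParty x.1) 0 (· + 1)))

-- The nested-defaultdict fold, characterised: items are the distinct labels in
-- first-occurrence order, each paired with the Counter of its party group.
lemma pb_fold_items (pairs : List (Int × String)) :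
    (pairs.foldl
        (fun d p => d.insert p.1 ((d.getD p.1 PySem.Dict.empty).modify p.2 0 (· + 1)))
        (PySem.Dict.empty : PySem.Dict Int (PySem.Dict String Int))).items
    = (PySem.Set.ofList (pairs.map (·.1))).map
        (fun lab => (lab, PySem.Dict.counter (pbGroup pairs lab))) := by
  induction pairs using List.reverseRecOn with
  | nil => rfl
  | append_singleton l x ih =>
    rw [List.foldl_append, List.foldl_cons, List.foldl_nil, List.map_append, List.map_cons, List.map_nil,
        PySem.Set.ofList_append_singleton]
    set D := l.foldl
      (fun d p => d.insert p.1 ((d.getD p.1 PySem.Dict.empty).modify p.2 0 (· + 1)))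
      (PySem.Dict.empty : PySem.Dict Int (PySem.Dict String Int)) with hD
    have hkeys : D.keys = PySem.Set.ofList (l.map (·.1)) := by
      show D.items.map (·.1) = _
      rw [ih, List.map_map]
      exact List.map_id _
    have hnd : D.keys.Nodup := by rw [hkeys]; exact PySem.Set.nodup_ofList _
    have hgrp : ∀ lab, pbGroup (l ++ [x]) lab
        = pbGroup l lab ++ (if x.1 == lab then [x.2] else []) := by
      intro lab
      by_cases h : x.1 = lab <;> simp [pbGroup, List.filter_append, h]
    by_cases hx : x.1 ∈ l.map (·.1)
    · -- label already present: insert overwrites in place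
      have hmem : x.1 ∈ PySem.Set.ofList (l.map (·.1)) := (PySem.Set.mem_ofList _ _).2 hx
      have hc : D.contains x.1 = true :=
        (PySem.Dict.contains_iff_mem_keys D x.1).2 (by rw [hkeys]; exact hmem)
      have hget : D.getD x.1 PySem.Dict.empty = PySem.Dict.counter (pbGroup l x.1) :=
        PySem.Dict.getD_of_mem_items D (by rw [ih]; exact List.mem_map_of_mem hmem) hnd _
      rw [PySem.Dict.items_insert_of_contains D _ hc, hget,
          ← PySem.Dict.counter_append_singleton, PySem.Set.add_of_mem hmem, ih,
          List.map_map]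
      refine List.map_congr_left ?_
      intro a ha
      by_cases h : a = x.1
      · simp [h, hgrp]
      · have hne : ¬ (x.1 = a) := fun hh => h hh.symm
        simp [Function.comp, h, hgrp, hne]
    · -- fresh label: insert appends, its group so far is empty
      have hmem : x.1 ∉ PySem.Set.ofList (l.map (·.1)) := fun hh => hx ((PySem.Set.mem_ofList _ _).1 hh)
      have hc : D.contains x.1 = false := by
        refine Bool.eq_false_iff.2 (fun h => hmem ?_)
        rw [← hkeys]
        exact (PySem.Dict.contains_iff_mem_keys D x.1).1 h
      have hgl : pbGroup l x.1 = [] := by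
        refine List.map_eq_nil_iff.2 (List.filter_eq_nil_iff.2 ?_)
        intro q hq hbeq
        have hm := List.mem_map_of_mem (f := fun q => q.1) hq
        simp only at hm
        rw [beq_iff_eq.1 hbeq] at hm
        exact hx hm
      rw [PySem.Dict.items_insert_of_not_contains D _ hc,
          PySem.Dict.getD_of_not_contains D _ hc, PySem.Set.add_of_not_mem hmem,
          List.map_append, ih]
      congr 1
      · refine List.map_congr_left ?_
        intro a ha
        have hne : ¬ (x.1 = a) := fun hh => hmem (hh ▸ ha)
        simp [hgrp, hne]
      · have hct : PySem.Dict.counter (pbGroup (l ++ [x]) x.1)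
            = (PySem.Dict.empty : PySem.Dict String Int).modify x.2 0 (· + 1) := by
          rw [hgrp, hgl]
          simp [PySem.Dict.counter]
        simp [hct]

-- ===== VERDICT (by name: the statement is the Claim_ definition above) =====
theorem party_breakdown_spec : Claim_equal_party_breakdown := by
  intro bills labels _
  unfold Spec_party_breakdown party_breakdown party_breakdown_alt
  rw [pb_fold_skip, show (List.zip bills labels).filterMap (fun bl => if bl.2 ≠ -1 then some (bl.2, pbParty bl.1) else none) = pbPairs bills labels from rfl, pb_fold_items]
  simp [List.map_map, Function.comp, PySem.Dict.items_counter]
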